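-- pv_equiv track=rewrite | github.com/thedoublejay/braingent-manifesto | starter-pack/scripts/compressors/filters.py | _drop_named_sections
-- ===== SOURCE A (Python) =====
-- def _drop_named_sections(text: str, headings: set[str]) -> str:
--     out: list[str] = []
--     skip = False
--     for line in text.splitlines(keepends=True):
--         heading = _h2_heading(line)
--         if heading is not None:
--             skip = heading in headings
--         if not skip:
--             out.append(line)
--     return "".join(out)
--
-- def _h2_heading(line: str) -> str | None:
--     stripped = line.strip()
--     if not stripped.startswith("## "):
--         return None
--     return stripped[3:].strip()
-- ===== SOURCE B (Python) =====
-- def _drop_named_sections(text: str, headings: set[str]) -> str: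
--     prefix: list[str] = []
--     groups: list[tuple[str, list[str]]] = []
--     for line in text.splitlines(keepends=True):
--         h = _h2_heading(line)
--         if h is not None:
--             groups.append((h, [line]))
--         elif groups:
--             groups[-1][1].append(line)
--         else:
--             prefix.append(line)
--     parts = list(prefix)
--     for h, sec in groups:
--         if h not in headings:
--             parts.extend(sec)
--     return "".join(parts)
--
-- def _h2_heading(line: str) -> str | None:
--     stripped = line.strip()
--     if not stripped.startswith("## "):
--         return None
--     return stripped[3:].strip()
-- ===== Notes on version B (the rewrite author's own statement) =====
-- stated objective: alternative
-- what changed: B first splits the text into a prefix plus (heading, section-lines) groups in one grouping pass, then emits the prefix and only the groups whose heading is not named, instead of A's single flag-driven filter loop.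
import Mathlib
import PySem

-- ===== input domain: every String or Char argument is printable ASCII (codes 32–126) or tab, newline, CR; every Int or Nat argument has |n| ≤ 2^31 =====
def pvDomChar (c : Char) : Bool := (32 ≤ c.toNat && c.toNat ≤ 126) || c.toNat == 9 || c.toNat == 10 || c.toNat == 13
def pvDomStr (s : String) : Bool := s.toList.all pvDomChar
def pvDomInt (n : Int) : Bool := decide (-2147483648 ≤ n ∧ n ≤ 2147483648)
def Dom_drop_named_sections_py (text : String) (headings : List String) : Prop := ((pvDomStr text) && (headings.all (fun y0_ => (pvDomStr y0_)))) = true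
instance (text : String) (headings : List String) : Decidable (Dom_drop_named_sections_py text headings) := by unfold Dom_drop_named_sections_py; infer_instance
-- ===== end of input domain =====

-- B replaces A's flag-driven filter loop by a grouping pass (prefix + (heading, lines) groups) followed by selective emission; same cost, different decomposition.

-- shared helper: text.splitlines(keepends=True); exact on the domain's character set
-- (tab/newline/CR/printable ASCII), where the only line boundaries are '\n', '\r\n', '\r'
def pvSlkAux : List Char → List Char → List (List Char)
  | acc, [] => if acc.isEmpty then [] else [acc.reverse]
  | acc, '\r' :: '\n' :: rest => (acc.reverse ++ ['\r', '\n']) :: pvSlkAux [] rest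
  | acc, '\r' :: rest => (acc.reverse ++ ['\r']) :: pvSlkAux [] rest
  | acc, '\n' :: rest => (acc.reverse ++ ['\n']) :: pvSlkAux [] rest
  | acc, c :: rest => pvSlkAux (c :: acc) rest

def splitlinesKeep (s : String) : List String := (pvSlkAux [] s.toList).map String.ofList

-- shared helper: _h2_heading (used verbatim by both A and B)
def h2_heading_py (line : String) : Option String :=
  let stripped := PySem.Str.strip line
  if !(PySem.Str.startswith stripped "## ") then none
  else some (PySem.Str.strip (PySem.Str.slice stripped (some 3) none))

-- ===== PORT A =====
-- loop body of A: state (out, skip)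
def stepA (headings : List String) (st : List String × Bool) (line : String) : List String × Bool :=
  match h2_heading_py line with
  | some h =>
      let skip := headings.contains h
      (if skip then st.1 else st.1 ++ [line], skip)
  | none => (if st.2 then st.1 else st.1 ++ [line], st.2)

def drop_named_sections_py (text : String) (headings : List String) : String :=
  PySem.Str.join "" ((splitlinesKeep text).foldl (stepA headings) ([], false)).1

-- ===== PORT B =====
-- loop body of B's grouping pass: state (prefix, groups), both kept reversed
def stepB (st : List String × List (String × List String)) (line : String) :
    List String × List (String × List String) :=
  match h2_heading_py line with
  | some h => (st.1, (h, [line]) :: st.2)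
  | none =>
      match st.2 with
      | [] => (line :: st.1, [])
      | (h, sec) :: gs => (st.1, (h, line :: sec) :: gs)

-- B's emission loop: keep a group's lines iff its heading is not named
def emitSecs (headings : List String) (g : List (String × List String)) : List String :=
  g.reverse.flatMap (fun hs => if headings.contains hs.1 then [] else hs.2.reverse)

def drop_named_sections_py_alt (text : String) (headings : List String) : String :=
  PySem.Str.join ""
    (((splitlinesKeep text).foldl stepB ([], [])).1.reverse
      ++ emitSecs headings ((splitlinesKeep text).foldl stepB ([], [])).2)

-- ===== PRECONDITION & SPEC =====
def Spec_drop_named_sections_py (text : String) (headings : List String) (out : String) : Prop := out = drop_named_sections_py_alt text headings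
instance (text : String) (headings : List String) (out : String) : Decidable (Spec_drop_named_sections_py text headings out) := by unfold Spec_drop_named_sections_py; infer_instance

-- ===== CLAIM (what is proved, stated in full; the proofs are below) =====
def Claim_equal_drop_named_sections_py : Prop := ∀ (text : String) (headings : List String), Dom_drop_named_sections_py text headings → Spec_drop_named_sections_py text headings (drop_named_sections_py text headings)

-- ===== LEMMAS AND PROOFS =====

lemma emitSecs_nil (headings : List String) : emitSecs headings [] = [] := rfl

lemma emitSecs_cons (headings : List String) (h : String) (sec : List String)
    (g : List (String × List String)) :
    emitSecs headings ((h, sec) :: g)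
      = emitSecs headings g ++ (if headings.contains h then [] else sec.reverse) := by
  simp [emitSecs]

-- the skip flag A maintains, read off B's group stack
def skipOf (headings : List String) : List (String × List String) → Bool
  | [] => false
  | (h, _) :: _ => headings.contains h

lemma loop_inv (headings : List String) :
    ∀ (lines out p : List String) (g : List (String × List String)),
      out = p.reverse ++ emitSecs headings g →
      (lines.foldl (stepA headings) (out, skipOf headings g)).1
        = (lines.foldl stepB (p, g)).1.reverse
            ++ emitSecs headings (lines.foldl stepB (p, g)).2 := by
  intro lines
  induction lines with
  | nil => intro out p g hout; simpa [skipOf] using hout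
  | cons line rest ih =>
    intro out p g hout
    simp only [List.foldl_cons]
    rcases hh : h2_heading_py line with _ | h
    · -- not a heading line
      cases g with
      | nil =>
        have h1 : stepA headings (out, skipOf headings []) line = (out ++ [line], false) := by
          simp [stepA, hh, skipOf]
        have h2 : stepB (p, ([] : List (String × List String))) line = (line :: p, []) := by
          simp [stepB, hh]
        have h3 : (false : Bool) = skipOf headings ([] : List (String × List String)) := rfl
        rw [h1, h2, h3]
        exact ih _ _ _ (by rw [hout]; simp [emitSecs])
      | cons hd gs =>
        rcases hd with ⟨h0, sec⟩
        have h2 : stepB (p, (h0, sec) :: gs) line = (p, (h0, line :: sec) :: gs) := by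
          simp [stepB, hh]
        by_cases hc : h0 ∈ headings
        · have h1 : stepA headings (out, skipOf headings ((h0, sec) :: gs)) line = (out, true) := by
            simp [stepA, hh, skipOf, hc]
          have h3 : (true : Bool) = skipOf headings ((h0, line :: sec) :: gs) := by
            simp [skipOf, hc]
          rw [h1, h2, h3]
          exact ih _ _ _ (by simp [hout, emitSecs_cons, hc])
        · have h1 : stepA headings (out, skipOf headings ((h0, sec) :: gs)) line
              = (out ++ [line], false) := by
            simp [stepA, hh, skipOf, hc]
          have h3 : (false : Bool) = skipOf headings ((h0, line :: sec) :: gs) := by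
            simp [skipOf, hc]
          rw [h1, h2, h3]
          exact ih _ _ _ (by simp [hout, emitSecs_cons, hc])
    · -- heading line: A resets skip, B starts a new group
      have h2 : stepB (p, g) line = (p, (h, [line]) :: g) := by
        simp [stepB, hh]
      by_cases hc : h ∈ headings
      · have h1 : stepA headings (out, skipOf headings g) line = (out, true) := by
          simp [stepA, hh, hc]
        have h3 : (true : Bool) = skipOf headings ((h, [line]) :: g) := by
          simp [skipOf, hc]
        rw [h1, h2, h3]
        exact ih _ _ _ (by simp [hout, emitSecs_cons, hc])
      · have h1 : stepA headings (out, skipOf headings g) line = (out ++ [line], false) := by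
          simp [stepA, hh, hc]
        have h3 : (false : Bool) = skipOf headings ((h, [line]) :: g) := by
          simp [skipOf, hc]
        rw [h1, h2, h3]
        exact ih _ _ _ (by simp [hout, emitSecs_cons, hc])

-- ===== VERDICT (by name: the statement is the Claim_ definition above) =====
theorem drop_named_sections_py_spec : Claim_equal_drop_named_sections_py := by
  unfold Claim_equal_drop_named_sections_py
  intro text headings _
  unfold Spec_drop_named_sections_py drop_named_sections_py drop_named_sections_py_alt
  have h := loop_inv headings (splitlinesKeep text) [] [] [] (by simp [emitSecs_nil])
  simp only [skipOf] at h
  rw [h]
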